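-- pv_equiv track=rewrite | github.com/AE-nv/aedvent-code-2022 | day 15/Xavier - Python/day.py | get_impossible_beacon_locations_at_y
-- ===== SOURCE A (Python) =====
-- def manhattan_distance(p1: tuple[int, int], p2: tuple[int, int]) -> int:
--     return abs(p1[0]-p2[0]) + abs(p1[1]-p2[1])
--
-- def get_impossible_beacon_locations_at_y(y: int, sensors: list[tuple[int, int]], beacons: list[tuple[int, int]]) -> set[int]:
--     impossible_points: set[int] = set()
--     for i in range(len(sensors)):
--         sensor, beacon = sensors[i], beacons[i]
--         distance = manhattan_distance(sensor, beacon)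
--         dx_edge = distance-abs(y-sensor[1])
--         if dx_edge >= 0:
--             impossible_points.update(list(range(sensor[0]-dx_edge, sensor[0]+dx_edge+1)))
--     beacons_at_y = set(beacon[0] for beacon in beacons if beacon[1] == y)
--     return impossible_points - beacons_at_y
-- ===== SOURCE B (Python) =====
-- def _cut(seg, c, d):
--     # pieces of [a,b] not covered by [c,d], in ascending order
--     a, b = seg
--     out = []
--     if a <= min(b, c - 1):
--         out.append((a, min(b, c - 1)))
--     if max(a, d + 1) <= b:
--         out.append((max(a, d + 1), b))
--     return out
--
-- def get_impossible_beacon_locations_at_y(y, sensors, beacons):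
--     covered = []      # covered x's, in first-seen order, no duplicates
--     prev = []         # intervals of sensors already processed
--     for (sx, sy), (bx, by) in zip(sensors, beacons):
--         r = abs(sx - bx) + abs(sy - by) - abs(y - sy)
--         if r >= 0:
--             lo, hi = sx - r, sx + r
--             segs = [(lo, hi)]
--             for c, d in prev:
--                 segs = [p for s in segs for p in _cut(s, c, d)]
--             for a, b in segs:
--                 covered.extend(range(a, b + 1))
--             prev.append((lo, hi))
--     banned = {x for x, yy in beacons if yy == y}
--     return {x for x in covered if x not in banned}
-- ===== Notes on version B (the rewrite author's own statement) =====
-- stated objective: alternative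
-- what changed: Replaces the per-point set.update over every covered x with interval arithmetic: each sensor's row-y interval is cut against the previously processed intervals, only the genuinely new sub-intervals are materialized, and beacon columns are filtered out at the end.
import Mathlib
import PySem

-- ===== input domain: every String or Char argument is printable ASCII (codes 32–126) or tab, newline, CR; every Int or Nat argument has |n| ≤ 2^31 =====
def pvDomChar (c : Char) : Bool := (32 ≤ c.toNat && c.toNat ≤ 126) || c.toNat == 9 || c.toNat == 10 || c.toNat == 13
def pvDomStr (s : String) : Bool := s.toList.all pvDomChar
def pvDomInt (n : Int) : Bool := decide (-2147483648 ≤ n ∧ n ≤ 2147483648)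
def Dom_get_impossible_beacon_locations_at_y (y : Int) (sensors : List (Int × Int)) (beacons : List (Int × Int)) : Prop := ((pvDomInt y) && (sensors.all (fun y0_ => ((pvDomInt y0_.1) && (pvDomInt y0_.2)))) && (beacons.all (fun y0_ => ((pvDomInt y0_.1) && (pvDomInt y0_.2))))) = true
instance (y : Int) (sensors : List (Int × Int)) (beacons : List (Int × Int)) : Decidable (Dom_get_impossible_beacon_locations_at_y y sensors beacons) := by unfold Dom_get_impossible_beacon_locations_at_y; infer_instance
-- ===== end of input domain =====

-- B replaces A's per-point set updates by interval cutting (only new sub-intervals are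
-- materialized); an alternative algorithm of similar size, not claimed faster.

-- ===== PORT A =====
def manhattan_distance (p1 : Int × Int) (p2 : Int × Int) : Int :=
  |p1.1 - p2.1| + |p1.2 - p2.2|

def get_impossible_beacon_locations_at_y (y : Int) (sensors : List (Int × Int)) (beacons : List (Int × Int)) : List Int :=
  let impossible_points : PySem.Set Int :=
    (PySem.List.pyRange 0 (PySem.List.len sensors) 1).foldl (fun acc i =>
      let sensor := PySem.List.pyGetD sensors i (0, 0)
      let beacon := PySem.List.pyGetD beacons i (0, 0)
      let distance := manhattan_distance sensor beacon
      let dx_edge := distance - |y - sensor.2|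
      if dx_edge ≥ 0 then
        PySem.Set.update acc (PySem.List.pyRange (sensor.1 - dx_edge) (sensor.1 + dx_edge + 1) 1)
      else acc) PySem.Set.empty
  let beacons_at_y : PySem.Set Int :=
    PySem.Set.ofList ((beacons.filter (fun b => b.2 == y)).map (fun b => b.1))
  PySem.Set.diff impossible_points beacons_at_y

-- ===== PORT B =====
-- pieces of [a,b] not covered by [c,d], in ascending order
def pvCut (seg : Int × Int) (c : Int) (d : Int) : List (Int × Int) :=
  (if seg.1 ≤ min seg.2 (c - 1) then [(seg.1, min seg.2 (c - 1))] else []) ++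
  (if max seg.1 (d + 1) ≤ seg.2 then [(max seg.1 (d + 1), seg.2)] else [])

def pvStep (y : Int) (st : List Int × List (Int × Int)) (p : (Int × Int) × (Int × Int)) :
    List Int × List (Int × Int) :=
  let r := |p.1.1 - p.2.1| + |p.1.2 - p.2.2| - |y - p.1.2|
  if r ≥ 0 then
    let lo := p.1.1 - r
    let hi := p.1.1 + r
    let segs := st.2.foldl (fun segs cd => segs.flatMap (fun s => pvCut s cd.1 cd.2)) [(lo, hi)]
    (st.1 ++ segs.flatMap (fun ab => PySem.List.pyRange ab.1 (ab.2 + 1) 1), st.2 ++ [(lo, hi)])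
  else st

def get_impossible_beacon_locations_at_y_alt (y : Int) (sensors : List (Int × Int)) (beacons : List (Int × Int)) : List Int :=
  let covered := ((sensors.zip beacons).foldl (pvStep y) ([], [])).1
  let banned : PySem.Set Int :=
    PySem.Set.ofList ((beacons.filter (fun b => b.2 == y)).map (fun b => b.1))
  PySem.Set.ofList (covered.filter (fun x => !(PySem.Set.contains banned x)))

-- ===== PRECONDITION & SPEC =====
-- A indexes beacons[i] for every sensor index i, so it raises IndexError when
-- there are fewer beacons than sensors; Pre_ excludes exactly those inputs.
def Pre_get_impossible_beacon_locations_at_y (y : Int) (sensors : List (Int × Int)) (beacons : List (Int × Int)) : Prop :=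
  sensors.length ≤ beacons.length
instance (y : Int) (sensors : List (Int × Int)) (beacons : List (Int × Int)) : Decidable (Pre_get_impossible_beacon_locations_at_y y sensors beacons) := by unfold Pre_get_impossible_beacon_locations_at_y; infer_instance

def pvWitness_get_impossible_beacon_locations_at_y : Int × (List (Int × Int)) × (List (Int × Int)) :=
  (10, [(8, 7), (2, 18)], [(2, 10), (-2, 15)])

def Spec_get_impossible_beacon_locations_at_y (y : Int) (sensors : List (Int × Int)) (beacons : List (Int × Int)) (out : List Int) : Prop := out = get_impossible_beacon_locations_at_y_alt y sensors beacons
instance (y : Int) (sensors : List (Int × Int)) (beacons : List (Int × Int)) (out : List Int) : Decidable (Spec_get_impossible_beacon_locations_at_y y sensors beacons out) := by unfold Spec_get_impossible_beacon_locations_at_y; infer_instance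

-- ===== CLAIM (what is proved, stated in full; the proofs are below) =====
def Claim_equal_get_impossible_beacon_locations_at_y : Prop := ∀ (y : Int) (sensors : List (Int × Int)) (beacons : List (Int × Int)), Dom_get_impossible_beacon_locations_at_y y sensors beacons → Pre_get_impossible_beacon_locations_at_y y sensors beacons → Spec_get_impossible_beacon_locations_at_y y sensors beacons (get_impossible_beacon_locations_at_y y sensors beacons)

-- ===== LEMMAS AND PROOFS =====

-- ===== proof helpers =====
def pvRng (ab : Int × Int) : List Int := PySem.List.pyRange ab.1 (ab.2 + 1) 1

def pvAStep (y : Int) (acc : PySem.Set Int) (p : (Int × Int) × (Int × Int)) : PySem.Set Int :=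
  let r := |p.1.1 - p.2.1| + |p.1.2 - p.2.2| - |y - p.1.2|
  if r ≥ 0 then
    PySem.Set.update acc (PySem.List.pyRange (p.1.1 - r) (p.1.1 + r + 1) 1)
  else acc

lemma pv_strict_ext (l1 l2 : List Int) (h1 : l1.Pairwise (·<·)) (h2 : l2.Pairwise (·<·))
    (hm : ∀ x, x ∈ l1 ↔ x ∈ l2) : l1 = l2 := by
  have hp : l1.Perm l2 := (List.perm_ext_iff_of_nodup (h1.imp ne_of_lt) (h2.imp ne_of_lt)).mpr hm
  exact hp.eq_of_pairwise (fun a b _ _ h h' => absurd h' (lt_asymm h)) h1 h2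

lemma pv_cut_enum (a b c d : Int) (hcd : c ≤ d) :
    (pvCut (a, b) c d).flatMap pvRng
      = (PySem.List.pyRange a (b + 1) 1).filter (fun x => !(decide (c ≤ x ∧ x ≤ d))) := by
  apply pv_strict_ext
  · unfold pvCut
    split_ifs with h1 h2 h2
    · simp only [List.flatMap_cons, List.flatMap_nil, List.nil_append, List.append_nil, pvRng,
        List.flatMap_append]
      rw [List.pairwise_append]
      refine ⟨PySem.List.pairwise_lt_pyRange_one _ _, PySem.List.pairwise_lt_pyRange_one _ _, ?_⟩
      intro x hx z hz
      rw [PySem.List.mem_pyRange_one] at hx hz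
      omega
    · simpa [pvRng] using PySem.List.pairwise_lt_pyRange_one (a : Int) (min b (c-1) + 1)
    · simpa [pvRng] using PySem.List.pairwise_lt_pyRange_one (max a (d+1)) (b + 1)
    · simp
  · exact List.Pairwise.filter _ (PySem.List.pairwise_lt_pyRange_one _ _)
  · intro x
    unfold pvCut
    split_ifs with h1 h2 h2 <;>
      simp only [List.flatMap_cons, List.flatMap_append, List.flatMap_nil, List.append_nil,
        List.nil_append, pvRng, List.mem_append, List.mem_filter, PySem.List.mem_pyRange_one,
        Bool.not_eq_true', decide_eq_false_iff_not, not_and, not_le, List.not_mem_nil,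
        false_iff, iff_false, not_or] <;> omega

lemma pv_cutstep_enum (c d : Int) (hcd : c ≤ d) (segs : List (Int × Int)) :
    (segs.flatMap (fun s => pvCut s c d)).flatMap pvRng
      = (segs.flatMap pvRng).filter (fun x => !(decide (c ≤ x ∧ x ≤ d))) := by
  rw [List.flatMap_assoc, List.filter_flatMap]
  exact List.flatMap_congr (fun s _ => by rcases s with ⟨a, b⟩; exact pv_cut_enum a b c d hcd)

lemma pv_cutfold_enum (prev : List (Int × Int)) (hprev : ∀ cd ∈ prev, cd.1 ≤ cd.2) :
    ∀ segs : List (Int × Int),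
      (prev.foldl (fun segs cd => segs.flatMap (fun s => pvCut s cd.1 cd.2)) segs).flatMap pvRng
        = (segs.flatMap pvRng).filter
            (fun x => prev.all (fun cd => !(decide (cd.1 ≤ x ∧ x ≤ cd.2)))) := by
  induction prev with
  | nil => intro segs; simp
  | cons hd tl ih =>
    intro segs
    rw [List.foldl_cons, ih (fun cd h => hprev cd (List.mem_cons_of_mem _ h)),
      pv_cutstep_enum hd.1 hd.2 (hprev hd List.mem_cons_self) segs, List.filter_filter]
    apply List.filter_congr
    intro x _
    simp [List.all_cons, Bool.and_comm]

lemma pv_main (y : Int) :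
    ∀ (L : List ((Int × Int) × (Int × Int))) (s : List Int) (prev : List (Int × Int)),
      s.Nodup →
      (∀ cd ∈ prev, cd.1 ≤ cd.2) →
      (∀ x, x ∈ s ↔ ∃ cd ∈ prev, cd.1 ≤ x ∧ x ≤ cd.2) →
      (L.foldl (pvStep y) (s, prev)).1 = L.foldl (pvAStep y) s
        ∧ (L.foldl (pvStep y) (s, prev)).1.Nodup := by
  intro L
  induction L with
  | nil => intro s prev hnd _ _; exact ⟨rfl, hnd⟩
  | cons p L ih =>
    intro s prev hnd hiv hmem
    simp only [List.foldl_cons]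
    by_cases hr : |p.1.1 - p.2.1| + |p.1.2 - p.2.2| - |y - p.1.2| ≥ 0
    case neg =>
      have hB : pvStep y (s, prev) p = (s, prev) := by
        simp only [pvStep]; rw [if_neg hr]
      have hA : pvAStep y s p = s := by
        simp only [pvAStep]; rw [if_neg hr]
      rw [hB, hA]
      exact ih s prev hnd hiv hmem
    case pos =>
      set r := |p.1.1 - p.2.1| + |p.1.2 - p.2.2| - |y - p.1.2| with hrdef
      set lo := p.1.1 - r with hlo
      set hi := p.1.1 + r with hhi
      set R : List Int := PySem.List.pyRange lo (hi + 1) 1 with hR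
      have hfil : ∀ x, (prev.all (fun cd => !(decide (cd.1 ≤ x ∧ x ≤ cd.2))))
          = !(PySem.Set.contains s x) := by
        intro x
        rw [Bool.eq_iff_iff]
        simp only [List.all_eq_true, Bool.not_eq_true', decide_eq_false_iff_not,
          PySem.Set.contains_eq_listContains, List.contains_eq_mem, Bool.not_eq_eq_eq_not,
          Bool.not_true, hmem x]
        push_neg
        tauto
      have hB : pvStep y (s, prev) p
          = (s ++ R.filter (fun x => !(PySem.Set.contains s x)), prev ++ [(lo, hi)]) := by
        simp only [pvStep]; rw [if_pos hr]
        refine Prod.ext ?_ rfl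
        show s ++ _ = s ++ _
        congr 1
        have : (fun (ab : Int × Int) => PySem.List.pyRange ab.1 (ab.2 + 1) 1) = pvRng := rfl
        rw [this, pv_cutfold_enum prev hiv [(lo, hi)]]
        simp only [List.flatMap_cons, List.flatMap_nil, List.append_nil, pvRng]
        exact List.filter_congr (fun x _ => hfil x)
      have hA : pvAStep y s p = s ++ R.filter (fun x => !(PySem.Set.contains s x)) := by
        simp only [pvAStep]; rw [if_pos hr]
        rw [PySem.Set.update_eq_append_filter,
          PySem.Set.ofList_eq_self_of_nodup _ (PySem.List.nodup_pyRange_one _ _)]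
      rw [hB, hA]
      refine ih _ _ ?_ ?_ ?_
      · refine List.Nodup.append hnd (List.Nodup.filter _ (PySem.List.nodup_pyRange_one _ _)) ?_
        intro x hx hxf
        have := (List.mem_filter.mp hxf).2
        simp only [Bool.not_eq_true', PySem.Set.contains_eq_listContains,
          List.contains_eq_mem, decide_eq_false_iff_not] at this
        exact this hx
      · intro cd hcd
        rcases List.mem_append.mp hcd with h | h
        · exact hiv cd h
        · simp only [List.mem_singleton] at h; subst h; simp only; omega
      · intro x
        simp only [List.mem_append, List.mem_filter, hmem x, List.mem_singleton,
          Bool.not_eq_true', PySem.Set.contains_eq_listContains, List.contains_eq_mem,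
          decide_eq_false_iff_not, hR, PySem.List.mem_pyRange_one]
        constructor
        · rintro (⟨cd, hcd, h1, h2⟩ | ⟨⟨h1, h2⟩, _⟩)
          · exact ⟨cd, Or.inl hcd, h1, h2⟩
          · exact ⟨(lo, hi), Or.inr rfl, h1, by omega⟩
        · rintro ⟨cd, hcd | hcd, h1, h2⟩
          · exact Or.inl ⟨cd, hcd, h1, h2⟩
          · subst hcd
            by_cases hs : ∃ cd ∈ prev, cd.1 ≤ x ∧ x ≤ cd.2
            · exact Or.inl hs
            · exact Or.inr ⟨⟨h1, by omega⟩, hs⟩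


-- ===== VERDICT (by name: the statement is the Claim_ definition above) =====
theorem get_impossible_beacon_locations_at_y_spec : Claim_equal_get_impossible_beacon_locations_at_y := by
  intro y sensors beacons _ hpre
  unfold Pre_get_impossible_beacon_locations_at_y at hpre
  unfold Spec_get_impossible_beacon_locations_at_y
  have hlen : (sensors.zip beacons).length = sensors.length := by
    rw [List.length_zip]; omega
  have hmain := pv_main y (sensors.zip beacons) [] [] List.nodup_nil
    (by intro cd h; cases h) (by intro x; simp)
  have hcong : ∀ (acc : PySem.Set Int), ∀ i ∈ PySem.List.pyRange 0 ((sensors.zip beacons).length : Int) 1,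
      (let sensor := PySem.List.pyGetD sensors i (0, 0)
       let beacon := PySem.List.pyGetD beacons i (0, 0)
       let distance := manhattan_distance sensor beacon
       let dx_edge := distance - |y - sensor.2|
       if dx_edge ≥ 0 then
         PySem.Set.update acc (PySem.List.pyRange (sensor.1 - dx_edge) (sensor.1 + dx_edge + 1) 1)
       else acc)
      = pvAStep y acc (PySem.List.pyGetD (sensors.zip beacons) i ((0, 0), (0, 0))) := by
    intro acc i hi
    rw [PySem.List.mem_pyRange_one] at hi
    have h1 := PySem.List.pyGetD_eq_getElem sensors (i := i) (0, 0) hi.1 (by omega)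
    have h2 := PySem.List.pyGetD_eq_getElem beacons (i := i) (0, 0) hi.1 (by push_cast; omega)
    have h3 := PySem.List.pyGetD_eq_getElem (sensors.zip beacons) (i := i) ((0, 0), (0, 0)) hi.1 (by omega)
    simp only [h1, h2, h3, List.getElem_zip, pvAStep, manhattan_distance]
  unfold get_impossible_beacon_locations_at_y get_impossible_beacon_locations_at_y_alt
  show PySem.Set.diff
      ((PySem.List.pyRange 0 (PySem.List.len sensors) 1).foldl (fun acc i =>
        let sensor := PySem.List.pyGetD sensors i (0, 0)
        let beacon := PySem.List.pyGetD beacons i (0, 0)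
        let distance := manhattan_distance sensor beacon
        let dx_edge := distance - |y - sensor.2|
        if dx_edge ≥ 0 then
          PySem.Set.update acc (PySem.List.pyRange (sensor.1 - dx_edge) (sensor.1 + dx_edge + 1) 1)
        else acc) PySem.Set.empty)
      (PySem.Set.ofList ((beacons.filter (fun b => b.2 == y)).map (fun b => b.1)))
    = PySem.Set.ofList
        ((((sensors.zip beacons).foldl (pvStep y) ([], [])).1).filter
          (fun x => !(PySem.Set.contains (PySem.Set.ofList ((beacons.filter (fun b => b.2 == y)).map (fun b => b.1))) x)))
  have e1 : PySem.List.pyRange 0 (PySem.List.len sensors) 1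
      = PySem.List.pyRange 0 ((sensors.zip beacons).length : Int) 1 := by
    rw [PySem.List.len_eq, hlen]
  rw [e1, PySem.List.foldl_congr_mem _ _
        (fun acc i => pvAStep y acc (PySem.List.pyGetD (sensors.zip beacons) i ((0, 0), (0, 0)))) _ hcong,
      PySem.List.foldl_pyRange_zero_pyGetD' (sensors.zip beacons) ((0, 0), (0, 0)) (pvAStep y) _,
      show (PySem.Set.empty : PySem.Set Int) = ([] : List Int) from rfl,
      ← hmain.1,
      PySem.Set.ofList_eq_self_of_nodup _ (List.Nodup.filter _ hmain.2)]
  rfl
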